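-- pv_equiv track=rewrite | github.com/Arthur-Dauphole/Projet-BRAIN | Arthur_2/BRAIN_PROJECT/modules/detector.py | _check_t_up
-- ===== SOURCE A (Python) =====
-- def _check_t_up(pixel_set, min_r, min_c, max_r, max_c, height, width):
--     """T with bar at bottom, stem going up."""
--     center_c = (min_c + max_c) // 2
--     expected = set()
--     for c in range(min_c, max_c + 1):
--         expected.add((max_r, c))
--     for r in range(min_r, max_r + 1):
--         expected.add((r, center_c))
--     return pixel_set == expected
-- ===== SOURCE B (Python) =====
-- def _check_t_up(pixel_set, min_r, min_c, max_r, max_c, height, width):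
--     """T with bar at bottom, stem going up: verify by counting + containment."""
--     center_c = (min_c + max_c) // 2
--     bar_n = max(0, max_c - min_c + 1)
--     stem_n = max(0, max_r - min_r + 1)
--     overlap = 1 if bar_n > 0 and stem_n > 0 else 0
--     if len(pixel_set) != bar_n + stem_n - overlap:
--         return False
--     for c in range(min_c, max_c + 1):
--         if (max_r, c) not in pixel_set:
--             return False
--     for r in range(min_r, max_r + 1):
--         if (r, center_c) not in pixel_set:
--             return False
--     return True
-- ===== Notes on version B (the rewrite author's own statement) =====
-- stated objective: alternative
-- what changed: B verifies the T shape by a closed-form cardinality guard (bar+stem-overlap distinct pixels) plus membership checks with early exit, instead of materialising the expected set and comparing for set equality.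
import Mathlib
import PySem

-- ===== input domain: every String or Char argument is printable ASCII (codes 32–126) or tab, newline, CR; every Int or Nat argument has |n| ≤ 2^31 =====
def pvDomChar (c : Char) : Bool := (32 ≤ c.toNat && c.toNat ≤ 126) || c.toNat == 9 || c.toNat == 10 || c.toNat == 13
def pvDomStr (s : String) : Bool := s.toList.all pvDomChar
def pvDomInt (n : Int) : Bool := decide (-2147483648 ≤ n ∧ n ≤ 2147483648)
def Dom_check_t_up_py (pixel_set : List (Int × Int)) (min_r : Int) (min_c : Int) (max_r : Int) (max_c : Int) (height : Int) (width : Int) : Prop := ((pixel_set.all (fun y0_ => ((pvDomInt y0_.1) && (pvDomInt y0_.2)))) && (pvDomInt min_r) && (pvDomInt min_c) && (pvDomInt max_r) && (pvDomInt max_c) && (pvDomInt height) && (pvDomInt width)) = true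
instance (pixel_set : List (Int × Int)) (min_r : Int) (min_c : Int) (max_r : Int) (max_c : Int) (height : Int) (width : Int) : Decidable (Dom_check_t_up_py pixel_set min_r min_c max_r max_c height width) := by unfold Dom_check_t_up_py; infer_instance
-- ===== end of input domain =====

-- B verifies the T shape by a closed-form cardinality guard plus membership checks, instead of A's construct-and-compare (objective: alternative, same cost).

-- ===== PORT A =====
def check_t_up_py (pixel_set : List (Int × Int)) (min_r : Int) (min_c : Int) (max_r : Int) (max_c : Int) (height : Int) (width : Int) : Bool :=
  let center_c := PySem.Int.floordiv (min_c + max_c) 2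
  let expected : PySem.Set (Int × Int) := PySem.Set.empty
  let expected := (PySem.List.pyRange min_c (max_c + 1) 1).foldl (fun s c => PySem.Set.add s (max_r, c)) expected
  let expected := (PySem.List.pyRange min_r (max_r + 1) 1).foldl (fun s r => PySem.Set.add s (r, center_c)) expected
  PySem.Set.equal pixel_set expected

-- ===== PORT B =====
def check_t_up_py_alt (pixel_set : List (Int × Int)) (min_r : Int) (min_c : Int) (max_r : Int) (max_c : Int) (height : Int) (width : Int) : Bool :=
  let center_c := PySem.Int.floordiv (min_c + max_c) 2
  let bar_n : Int := max 0 (max_c - min_c + 1)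
  let stem_n : Int := max 0 (max_r - min_r + 1)
  let overlap : Int := if bar_n > 0 && stem_n > 0 then 1 else 0
  if (pixel_set.length : Int) ≠ bar_n + stem_n - overlap then false
  else
    ((PySem.List.pyRange min_c (max_c + 1) 1).all (fun c => pixel_set.contains ((max_r, c) : Int × Int))) &&
    ((PySem.List.pyRange min_r (max_r + 1) 1).all (fun r => pixel_set.contains ((r, center_c) : Int × Int)))

-- ===== PRECONDITION & SPEC =====
-- pixel_set is the List encoding of a Python 'set', which holds the DISTINCT elements; Pre_ states that encoding invariant (Nodup).
def Pre_check_t_up_py (pixel_set : List (Int × Int)) (min_r : Int) (min_c : Int) (max_r : Int) (max_c : Int) (height : Int) (width : Int) : Prop := pixel_set.Nodup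
instance (pixel_set : List (Int × Int)) (min_r : Int) (min_c : Int) (max_r : Int) (max_c : Int) (height : Int) (width : Int) : Decidable (Pre_check_t_up_py pixel_set min_r min_c max_r max_c height width) := by unfold Pre_check_t_up_py; infer_instance

def pvWitness_check_t_up_py : (List (Int × Int)) × Int × Int × Int × Int × Int × Int := ([(1,0),(1,1),(1,2),(0,1)], 0, 0, 1, 2, 2, 3)

def Spec_check_t_up_py (pixel_set : List (Int × Int)) (min_r : Int) (min_c : Int) (max_r : Int) (max_c : Int) (height : Int) (width : Int) (out : Bool) : Prop := out = check_t_up_py_alt pixel_set min_r min_c max_r max_c height width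
instance (pixel_set : List (Int × Int)) (min_r : Int) (min_c : Int) (max_r : Int) (max_c : Int) (height : Int) (width : Int) (out : Bool) : Decidable (Spec_check_t_up_py pixel_set min_r min_c max_r max_c height width out) := by unfold Spec_check_t_up_py; infer_instance

-- ===== CLAIM (what is proved, stated in full; the proofs are below) =====
def Claim_equal_check_t_up_py : Prop := ∀ (pixel_set : List (Int × Int)) (min_r : Int) (min_c : Int) (max_r : Int) (max_c : Int) (height : Int) (width : Int), Dom_check_t_up_py pixel_set min_r min_c max_r max_c height width → Pre_check_t_up_py pixel_set min_r min_c max_r max_c height width → Spec_check_t_up_py pixel_set min_r min_c max_r max_c height width (check_t_up_py pixel_set min_r min_c max_r max_c height width)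

-- ===== LEMMAS AND PROOFS =====

-- the bar row and the stem column of the expected T, as explicit lists
def pvBarL (min_c max_r max_c : Int) : List (Int × Int) :=
  (PySem.List.pyRange min_c (max_c + 1) 1).map (fun c => (max_r, c))
def pvStemL (min_r max_r cc : Int) : List (Int × Int) :=
  (PySem.List.pyRange min_r (max_r + 1) 1).map (fun r => (r, cc))

lemma pvNodup_barL (min_c max_r max_c : Int) : (pvBarL min_c max_r max_c).Nodup :=
  List.Nodup.map (fun a b h => by simpa using congrArg Prod.snd h) (PySem.List.nodup_pyRange_one _ _)

lemma pvNodup_stemL (min_r max_r cc : Int) : (pvStemL min_r max_r cc).Nodup :=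
  List.Nodup.map (fun a b h => by simpa using congrArg Prod.fst h) (PySem.List.nodup_pyRange_one _ _)

lemma pvMem_barL (min_c max_r max_c : Int) (y : Int × Int) :
    y ∈ pvBarL min_c max_r max_c ↔ y.1 = max_r ∧ min_c ≤ y.2 ∧ y.2 < max_c + 1 := by
  obtain ⟨a, b⟩ := y
  simp [pvBarL, PySem.List.mem_pyRange_one]
  aesop

lemma pvMem_stemL (min_r max_r cc : Int) (y : Int × Int) :
    y ∈ pvStemL min_r max_r cc ↔ y.2 = cc ∧ min_r ≤ y.1 ∧ y.1 < max_r + 1 := by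
  obtain ⟨a, b⟩ := y
  simp [pvStemL, PySem.List.mem_pyRange_one]
  aesop

-- the set A builds, in explicit list form
lemma pvExpected_eq (min_r min_c max_r max_c cc : Int) :
    (PySem.List.pyRange min_r (max_r + 1) 1).foldl (fun s r => PySem.Set.add s (r, cc))
      ((PySem.List.pyRange min_c (max_c + 1) 1).foldl (fun s c => PySem.Set.add s ((max_r, c) : Int × Int)) PySem.Set.empty)
    = pvBarL min_c max_r max_c ++ (pvStemL min_r max_r cc).filter (fun y => !((pvBarL min_c max_r max_c).contains y)) := by
  rw [← PySem.Set.update_map_eq_foldl_add, ← PySem.Set.update_map_eq_foldl_add]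
  rw [show PySem.Set.update PySem.Set.empty ((PySem.List.pyRange min_c (max_c + 1) 1).map (fun c => ((max_r, c) : Int × Int))) = PySem.Set.ofList (pvBarL min_c max_r max_c) from rfl]
  have h1 : PySem.Set.ofList (pvBarL min_c max_r max_c) = pvBarL min_c max_r max_c := PySem.Set.ofList_eq_self_of_nodup _ (pvNodup_barL min_c max_r max_c)
  rw [h1]
  rw [show ((PySem.List.pyRange min_r (max_r + 1) 1).map (fun r => ((r, cc) : Int × Int))) = pvStemL min_r max_r cc from rfl]
  rw [PySem.Set.update_eq_append_filter]
  have h2 : PySem.Set.ofList (pvStemL min_r max_r cc) = pvStemL min_r max_r cc := PySem.Set.ofList_eq_self_of_nodup _ (pvNodup_stemL min_r max_r cc)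
  rw [h2]
  simp

lemma pvFloordiv_bounds (a b : Int) (h : a ≤ b) :
    a ≤ PySem.Int.floordiv (a + b) 2 ∧ PySem.Int.floordiv (a + b) 2 ≤ b := by
  have h1 : (a + b) = 2 * ((a + b).fdiv 2) + (a + b).fmod 2 := (Int.mul_fdiv_add_fmod _ _).symm
  have h2 : 0 ≤ (a + b).fmod 2 := Int.fmod_nonneg_of_pos _ (by norm_num)
  have h3 : (a + b).fmod 2 < 2 := Int.fmod_lt_of_pos _ (by norm_num)
  have h4 : PySem.Int.floordiv (a + b) 2 = (a + b).fdiv 2 := rfl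
  rw [h4]
  omega

-- the expected set has exactly B's closed-form count of elements
lemma pvExpected_length (min_r min_c max_r max_c cc : Int)
    (hcc : min_c ≤ max_c → (min_c ≤ cc ∧ cc ≤ max_c)) :
    ((pvBarL min_c max_r max_c ++ (pvStemL min_r max_r cc).filter (fun y => !((pvBarL min_c max_r max_c).contains y))).length : Int)
    = max 0 (max_c - min_c + 1) + max 0 (max_r - min_r + 1) -
      (if (max 0 (max_c - min_c + 1) > 0 && max 0 (max_r - min_r + 1) > 0) then (1:Int) else 0) := by
  have hbarlen : (pvBarL min_c max_r max_c).length = (max_c + 1 - min_c).toNat := by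
    simp [pvBarL, PySem.List.length_pyRange_one]
  by_cases hs : min_r ≤ max_r
  · have hsplit : PySem.List.pyRange min_r (max_r + 1) 1 = PySem.List.pyRange min_r max_r 1 ++ [max_r] :=
      PySem.List.pyRange_one_succ_right hs
    have hmap : pvStemL min_r max_r cc
        = (PySem.List.pyRange min_r max_r 1).map (fun r => ((r, cc) : Int × Int)) ++ [(max_r, cc)] := by
      simp [pvStemL, hsplit]
    have hkeep : ((PySem.List.pyRange min_r max_r 1).map (fun r => ((r, cc) : Int × Int))).filter
        (fun y => !((pvBarL min_c max_r max_c).contains y))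
        = (PySem.List.pyRange min_r max_r 1).map (fun r => ((r, cc) : Int × Int)) := by
      apply List.filter_eq_self.2
      intro y hy
      obtain ⟨r, hr, rfl⟩ := List.mem_map.1 hy
      have hrlt : r < max_r := (PySem.List.mem_pyRange_one.1 hr).2
      have : ((r, cc) : Int × Int) ∉ pvBarL min_c max_r max_c := by
        intro hmem
        have := (pvMem_barL min_c max_r max_c (r, cc)).1 hmem
        simp at this; omega
      simpa [List.contains_iff_mem] using this
    rw [hmap, List.filter_append, hkeep]
    by_cases hb : min_c ≤ max_c
    · have hin : ((max_r, cc) : Int × Int) ∈ pvBarL min_c max_r max_c := by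
        have := hcc hb
        exact (pvMem_barL min_c max_r max_c (max_r, cc)).2 (by constructor; rfl; constructor <;> simp <;> omega)
      have hdrop : List.filter (fun y => !((pvBarL min_c max_r max_c).contains y)) [((max_r, cc) : Int × Int)] = [] := by
        simp [hin]
      rw [hdrop]
      simp [hbarlen, PySem.List.length_pyRange_one]
      omega
    · have hnin : ((max_r, cc) : Int × Int) ∉ pvBarL min_c max_r max_c := by
        intro hmem
        have := (pvMem_barL min_c max_r max_c (max_r, cc)).1 hmem
        simp at this; omega
      have hkeep2 : List.filter (fun y => !((pvBarL min_c max_r max_c).contains y)) [((max_r, cc) : Int × Int)] = [((max_r, cc) : Int × Int)] := by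
        simp [hnin]
      rw [hkeep2]
      simp [hbarlen, PySem.List.length_pyRange_one]
      omega
  · have hnil : pvStemL min_r max_r cc = [] := by
      simp [pvStemL, PySem.List.pyRange_one_eq_nil (by omega : max_r + 1 ≤ min_r)]
    rw [hnil]
    simp [hbarlen]
    omega

lemma pvNodup_expected (min_r min_c max_r max_c cc : Int) :
    (pvBarL min_c max_r max_c ++ (pvStemL min_r max_r cc).filter (fun y => !((pvBarL min_c max_r max_c).contains y))).Nodup := by
  refine List.Nodup.append (pvNodup_barL _ _ _) (List.Nodup.filter _ (pvNodup_stemL _ _ _)) ?_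
  intro y hy hy'
  have := List.of_mem_filter hy'
  simp at this
  exact this hy

lemma pvMem_expected (min_r min_c max_r max_c cc : Int) (y : Int × Int) :
    y ∈ pvBarL min_c max_r max_c ++ (pvStemL min_r max_r cc).filter (fun y => !((pvBarL min_c max_r max_c).contains y))
    ↔ y ∈ pvBarL min_c max_r max_c ∨ y ∈ pvStemL min_r max_r cc := by
  simp only [List.mem_append, List.mem_filter, Bool.not_eq_eq_eq_not, Bool.not_true,
    List.contains_eq_mem, decide_eq_false_iff_not]
  constructor
  · rintro (h | ⟨h, _⟩)
    · exact Or.inl h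
    · exact Or.inr h
  · rintro (h | h)
    · exact Or.inl h
    · by_cases hb : y ∈ pvBarL min_c max_r max_c
      · exact Or.inl hb
      · exact Or.inr ⟨h, hb⟩

-- ===== VERDICT (by name: the statement is the Claim_ definition above) =====
theorem check_t_up_py_spec : Claim_equal_check_t_up_py := by
  intro pixel_set min_r min_c max_r max_c height width _hdom hpre
  unfold Spec_check_t_up_py
  unfold check_t_up_py check_t_up_py_alt
  dsimp only
  set cc := PySem.Int.floordiv (min_c + max_c) 2 with hcc_def
  have hccb : min_c ≤ max_c → (min_c ≤ cc ∧ cc ≤ max_c) := fun h => pvFloordiv_bounds min_c max_c h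
  rw [pvExpected_eq min_r min_c max_r max_c cc]
  set E := pvBarL min_c max_r max_c ++ (pvStemL min_r max_r cc).filter (fun y => !((pvBarL min_c max_r max_c).contains y)) with hE
  have hElen := pvExpected_length min_r min_c max_r max_c cc hccb
  have hEnodup := pvNodup_expected min_r min_c max_r max_c cc
  have hEmem := pvMem_expected min_r min_c max_r max_c cc
  set cnt : Int := max 0 (max_c - min_c + 1) + max 0 (max_r - min_r + 1) -
      (if (max 0 (max_c - min_c + 1) > 0 && max 0 (max_r - min_r + 1) > 0) then (1:Int) else 0) with hcnt
  have hA : PySem.Set.equal pixel_set E = true ↔ (∀ x, x ∈ pixel_set ↔ x ∈ E) := PySem.Set.equal_iff _ _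
  by_cases hP : ∀ x : Int × Int, x ∈ pixel_set ↔ x ∈ E
  · have hperm : pixel_set.Perm E := (List.perm_ext_iff_of_nodup hpre hEnodup).2 hP
    have hlen' : (pixel_set.length : Int) = cnt := by rw [hperm.length_eq]; exact hElen
    rw [hA.2 hP, if_neg (not_not.2 hlen')]
    symm
    simp only [Bool.and_eq_true, List.all_eq_true]
    refine ⟨fun c hc => ?_, fun r hr => ?_⟩
    · have hm := PySem.List.mem_pyRange_one.1 hc
      have : ((max_r, c) : Int × Int) ∈ E := (hEmem _).2 (Or.inl
        ((pvMem_barL min_c max_r max_c (max_r, c)).2 ⟨rfl, by simpa using hm⟩))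
      simpa [List.contains_iff_mem] using (hP _).2 this
    · have hm := PySem.List.mem_pyRange_one.1 hr
      have : ((r, cc) : Int × Int) ∈ E := (hEmem _).2 (Or.inr
        ((pvMem_stemL min_r max_r cc (r, cc)).2 ⟨rfl, by simpa using hm⟩))
      simpa [List.contains_iff_mem] using (hP _).2 this
  · have hAf : PySem.Set.equal pixel_set E = false := by
      rcases Bool.eq_false_or_eq_true (PySem.Set.equal pixel_set E) with h | h
      · exact absurd (hA.1 h) hP
      · exact h
    rw [hAf]
    by_cases hlen : (pixel_set.length : Int) = cnt
    · rw [if_neg (not_not.2 hlen)]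
      symm
      rcases Bool.eq_false_or_eq_true (((PySem.List.pyRange min_c (max_c + 1) 1).all (fun c => pixel_set.contains ((max_r, c) : Int × Int))) &&
        ((PySem.List.pyRange min_r (max_r + 1) 1).all (fun r => pixel_set.contains ((r, cc) : Int × Int)))) with hb | hb
      · exfalso
        simp only [Bool.and_eq_true, List.all_eq_true] at hb
        obtain ⟨h1, h2⟩ := hb
        have hsub : ∀ y ∈ E, y ∈ pixel_set := by
          intro y hy
          rcases (hEmem y).1 hy with h | h
          · have hm := (pvMem_barL min_c max_r max_c y).1 h
            have hmem := h1 y.2 (PySem.List.mem_pyRange_one.2 ⟨hm.2.1, hm.2.2⟩)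
            have hy1 : y = (max_r, y.2) := by
              obtain ⟨a, b⟩ := y; simp only [Prod.mk.injEq]; exact ⟨hm.1, trivial⟩
            rw [hy1]; simpa [List.contains_iff_mem] using hmem
          · have hm := (pvMem_stemL min_r max_r cc y).1 h
            have hmem := h2 y.1 (PySem.List.mem_pyRange_one.2 ⟨hm.2.1, hm.2.2⟩)
            have hy1 : y = (y.1, cc) := by
              obtain ⟨a, b⟩ := y; simp only [Prod.mk.injEq]; exact ⟨trivial, hm.1⟩
            rw [hy1]; simpa [List.contains_iff_mem] using hmem
        have hcard : E.toFinset.card = pixel_set.toFinset.card := by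
          rw [List.toFinset_card_of_nodup hEnodup, List.toFinset_card_of_nodup hpre]
          have h5 : (pixel_set.length : Int) = (E.length : Int) := by rw [hlen, ← hElen]
          exact_mod_cast h5.symm
        have hfsub : E.toFinset ⊆ pixel_set.toFinset := fun y hy =>
          List.mem_toFinset.2 (hsub y (List.mem_toFinset.1 hy))
        have hfeq : E.toFinset = pixel_set.toFinset := Finset.eq_of_subset_of_card_le hfsub (le_of_eq hcard.symm)
        exact hP (fun x => ⟨fun hx => List.mem_toFinset.1 (hfeq ▸ List.mem_toFinset.2 hx),
          fun hx => hsub x hx⟩)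
      · exact hb
    · rw [if_pos hlen]
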